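-- pv_equiv track=rewrite | github.com/liuj001/jiucuo | yolo/process/all_detections_filt_third.py | process_dict
-- ===== SOURCE A (Python) =====
-- def process_dict(input_dict):
--     """
--     This function processes a dictionary of lists of indices.
--     It merges consecutive indices and returns a flattened list of non-consecutive indices.
--
--     Args:
--     input_dict (dict): Dictionary with lists of indices.
--
--     Returns:
--     list: A list of processed indices.
--     """
--     # Convert the values of the dictionary into an array list
--     array_list = list(input_dict.values())
--
--     # Initialize the result array
--     result = []
--
--     for i in range(len(array_list)):
--         current_array = array_list[i]
--         if i == 0:
--              # For the first array, directly append the first element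
--             result.append(current_array[0])
--         else:
--             previous = result[-1]
--             found = False
--             # Merge consecutive numbers
--             for num in current_array:
--                 if num == previous + 1:
--                     result.append(num)
--                     found = True
--                     break
--             # If no consecutive numbers found, select the smallest number greater than the previous one
--             if not found:
--                 for num in current_array:
--                     if num > previous:
--                         result.append(num)
--                         break
--
--     return result
-- ===== SOURCE B (Python) =====
-- def process_dict(input_dict):
--     values = list(input_dict.values())
--     if not values:
--         return []
--     result = [values[0][0]]
--     prev = result[0]
--     for arr in values[1:]:
--         nxt = _pick(prev, arr)
--         if nxt is not None:
--             result.append(nxt)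
--             prev = nxt
--     return result
--
--
-- def _pick(prev, arr):
--     """One pass: return the first element equal to prev+1 if any,
--     otherwise the first element greater than prev, else None."""
--     candidate = None
--     for num in arr:
--         if num == prev + 1:
--             return num
--         if candidate is None and num > prev:
--             candidate = num
--     return candidate
-- ===== Notes on version B (the rewrite author's own statement) =====
-- stated objective: alternative
-- what changed: B replaces A's two sequential inner scans (first for previous+1, then for the first element > previous) by a single pass keeping one fallback candidate, and tracks the previous value in a variable instead of re-reading result[-1] under an enumerated index loop.
-- outside the precondition, e.g. on process_dict({'a': []}): A raises IndexError, B raises IndexError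
import Mathlib
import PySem

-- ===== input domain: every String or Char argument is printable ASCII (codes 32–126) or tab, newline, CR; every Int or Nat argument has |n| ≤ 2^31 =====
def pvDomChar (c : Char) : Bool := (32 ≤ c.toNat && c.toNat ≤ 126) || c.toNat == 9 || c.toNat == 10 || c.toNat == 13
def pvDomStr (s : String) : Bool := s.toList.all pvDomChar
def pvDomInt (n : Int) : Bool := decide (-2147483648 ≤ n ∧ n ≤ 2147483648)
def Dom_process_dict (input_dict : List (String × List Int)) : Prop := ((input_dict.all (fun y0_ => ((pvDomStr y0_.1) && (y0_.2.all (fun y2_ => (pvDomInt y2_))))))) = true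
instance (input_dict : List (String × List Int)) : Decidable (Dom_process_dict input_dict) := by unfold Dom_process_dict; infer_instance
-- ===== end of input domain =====

-- B collapses A's two sequential inner scans into one pass keeping a fallback candidate, and
-- tracks the previous value in a variable instead of re-reading result[-1] under an index loop.


-- ===== PORT A =====
-- inner loop 1: "for num in current_array: if num == previous + 1: append; break"
def pdFindConsec (previous : Int) : List Int → Option Int
  | [] => none
  | num :: rest => if num = previous + 1 then some num else pdFindConsec previous rest

-- inner loop 2: "for num in current_array: if num > previous: append; break"
def pdFindGreater (previous : Int) : List Int → Option Int
  | [] => none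
  | num :: rest => if num > previous then some num else pdFindGreater previous rest

def process_dict (input_dict : List (String × List Int)) : List Int :=
  let array_list := (PySem.Dict.ofList input_dict).values
  (PySem.List.enumerate array_list).foldl
    (fun result (p : Int × List Int) =>
      let current_array := p.2
      if p.1 = 0 then
        -- current_array[0]; raises IndexError on an empty first list (excluded by Pre_)
        result ++ [(PySem.List.pyGet? current_array 0).getD 0]
      else
        let previous := result.getLast?.getD 0
        match pdFindConsec previous current_array with
        | some num => result ++ [num]
        | none =>
          match pdFindGreater previous current_array with
          | some num => result ++ [num]
          | none => result) []

-- ===== PORT B =====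
-- _pick: one pass, first element = prev+1 wins immediately, else first element > prev
def pdPickGo (prev : Int) (candidate : Option Int) : List Int → Option Int
  | [] => candidate
  | num :: rest =>
    if num = prev + 1 then some num
    else if candidate = none ∧ num > prev then pdPickGo prev (some num) rest
    else pdPickGo prev candidate rest

def process_dict_alt (input_dict : List (String × List Int)) : List Int :=
  match (PySem.Dict.ofList input_dict).values with
  | [] => []
  | first :: rest =>
    let head := (PySem.List.pyGet? first 0).getD 0
    (rest.foldl
      (fun (acc : List Int × Int) arr =>
        match pdPickGo acc.2 none arr with
        | some nxt => (acc.1 ++ [nxt], nxt)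
        | none => acc) ([head], head)).1

-- ===== PRECONDITION & SPEC =====
-- Pre_ excludes exactly the inputs where Python A raises IndexError: a non-empty dict whose
-- first value is an empty list (current_array[0] on the first iteration); B raises there too.
def Pre_process_dict (input_dict : List (String × List Int)) : Prop :=
  (PySem.Dict.ofList input_dict).values.head? ≠ some []
instance (input_dict : List (String × List Int)) : Decidable (Pre_process_dict input_dict) := by
  unfold Pre_process_dict; infer_instance

def pvWitness_process_dict : (List (String × List Int)) := [("a", [3, 4]), ("b", [5, 9])]

def Spec_process_dict (input_dict : List (String × List Int)) (out : List Int) : Prop := out = process_dict_alt input_dict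
instance (input_dict : List (String × List Int)) (out : List Int) : Decidable (Spec_process_dict input_dict out) := by unfold Spec_process_dict; infer_instance

-- ===== CLAIM (what is proved, stated in full; the proofs are below) =====
def Claim_equal_process_dict : Prop := ∀ (input_dict : List (String × List Int)), Dom_process_dict input_dict → Pre_process_dict input_dict → Spec_process_dict input_dict (process_dict input_dict)

-- ===== LEMMAS AND PROOFS =====

-- with a candidate already fixed, the one-pass scan only looks for prev+1
theorem pdPickGo_some (prev c : Int) (arr : List Int) :
    pdPickGo prev (some c) arr =
      (match pdFindConsec prev arr with | some n => some n | none => some c) := by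
  induction arr with
  | nil => rfl
  | cons n t ih =>
    simp only [pdPickGo, pdFindConsec]
    split_ifs with h1 h2
    · rfl
    · simp at h2
    · simpa using ih

-- the one-pass scan equals A's two sequential scans
theorem pdPickGo_eq (prev : Int) (arr : List Int) :
    pdPickGo prev none arr =
      (match pdFindConsec prev arr with
       | some n => some n
       | none => pdFindGreater prev arr) := by
  induction arr with
  | nil => rfl
  | cons n t ih =>
    by_cases h1 : n = prev + 1
    · simp [pdPickGo, pdFindConsec, h1]
    · by_cases h2 : n > prev
      · simp only [pdPickGo, pdFindConsec, pdFindGreater, if_neg h1]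
        rw [if_pos ⟨trivial, h2⟩, pdPickGo_some]
        simp [h2]
      · simp only [pdPickGo, pdFindConsec, pdFindGreater, if_neg h1]
        rw [if_neg (by simp [h2])]
        rw [ih]
        simp [h2]

-- A's remaining fold (all indices ≠ 0) equals B's fold, given the tracked prev is result's last
theorem pd_main (rest : List (List Int)) :
    ∀ (r : List Int) (prev : Int) (k : Int), r.getLast? = some prev → 1 ≤ k →
    (PySem.List.enumerate rest k).foldl
      (fun result (p : Int × List Int) =>
        let current_array := p.2
        if p.1 = 0 then
          result ++ [(PySem.List.pyGet? current_array 0).getD 0]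
        else
          let previous := result.getLast?.getD 0
          match pdFindConsec previous current_array with
          | some num => result ++ [num]
          | none =>
            match pdFindGreater previous current_array with
            | some num => result ++ [num]
            | none => result) r
    = (rest.foldl
        (fun (acc : List Int × Int) arr =>
          match pdPickGo acc.2 none arr with
          | some nxt => (acc.1 ++ [nxt], nxt)
          | none => acc) (r, prev)).1 := by
  induction rest with
  | nil => intro r prev k h hk; simp [PySem.List.enumerate_nil]
  | cons arr t ih =>
    intro r prev k h hk
    rw [PySem.List.enumerate_cons]
    simp only [List.foldl_cons, if_neg (show k ≠ 0 by omega)]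
    rw [h]
    simp only [Option.getD_some]
    rw [pdPickGo_eq]
    have hk' : 1 ≤ k + 1 := by omega
    have hlast : ∀ n : Int, (r ++ [n]).getLast? = some n := by
      intro n; simp
    cases hc : pdFindConsec prev arr with
    | some n => exact ih (r ++ [n]) n (k + 1) (hlast n) hk'
    | none =>
      cases hg : pdFindGreater prev arr with
      | some n => exact ih (r ++ [n]) n (k + 1) (hlast n) hk'
      | none => exact ih r prev (k + 1) h hk'

-- ===== VERDICT (by name: the statement is the Claim_ definition above) =====
theorem process_dict_spec : Claim_equal_process_dict := by
  intro input_dict _ hpre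
  unfold Spec_process_dict process_dict process_dict_alt
  unfold Pre_process_dict at hpre
  cases hv : (PySem.Dict.ofList input_dict).values with
  | nil => simp [PySem.List.enumerate_nil]
  | cons first rest =>
    rw [hv] at hpre
    simp only [hv]
    rw [PySem.List.enumerate_cons]
    simp only [List.foldl_cons, if_pos rfl]
    exact pd_main rest _ _ 1 (by simp) (by omega)
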